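-- pv_equiv track=rewrite | github.com/sydches/yuj_temp | tests/context_strategies/_working_set_baseline.py | _fit_blocks
-- ===== SOURCE A (Python) =====
-- def _fit_blocks(blocks: list[str], max_chars: int, max_entries: int | None = None) -> str:
--     if not blocks or max_chars <= 0:
--         return ""
--     chosen = blocks[-max_entries:] if max_entries else blocks
--     kept_rev: list[str] = []
--     used = 0
--     for block in reversed(chosen):
--         add = len(block) + (2 if kept_rev else 0)
--         if used + add > max_chars and kept_rev:
--             break
--         kept_rev.append(block)
--         used += add
--     return "\n".join(reversed(kept_rev))
-- ===== SOURCE B (Python) =====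
-- def _fit_blocks(blocks: list[str], max_chars: int, max_entries: int | None = None) -> str:
--     if not blocks or max_chars <= 0:
--         return ""
--     chosen = blocks[-max_entries:] if max_entries else blocks
--     total = sum(len(b) for b in chosen) + 2 * (len(chosen) - 1)
--     i = 0
--     while len(chosen) - i > 1 and total > max_chars:
--         total -= len(chosen[i]) + 2
--         i += 1
--     return "\n".join(chosen[i:])
-- ===== Notes on version B (the rewrite author's own statement) =====
-- stated objective: alternative
-- what changed: Instead of accumulating blocks from the end with a growing 'used' counter and a break, B computes the total 2-separator-accounted size of the whole chosen list once and drops blocks from the front while more than one block remains and the total exceeds max_chars, then joins the remaining suffix.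
import Mathlib
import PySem

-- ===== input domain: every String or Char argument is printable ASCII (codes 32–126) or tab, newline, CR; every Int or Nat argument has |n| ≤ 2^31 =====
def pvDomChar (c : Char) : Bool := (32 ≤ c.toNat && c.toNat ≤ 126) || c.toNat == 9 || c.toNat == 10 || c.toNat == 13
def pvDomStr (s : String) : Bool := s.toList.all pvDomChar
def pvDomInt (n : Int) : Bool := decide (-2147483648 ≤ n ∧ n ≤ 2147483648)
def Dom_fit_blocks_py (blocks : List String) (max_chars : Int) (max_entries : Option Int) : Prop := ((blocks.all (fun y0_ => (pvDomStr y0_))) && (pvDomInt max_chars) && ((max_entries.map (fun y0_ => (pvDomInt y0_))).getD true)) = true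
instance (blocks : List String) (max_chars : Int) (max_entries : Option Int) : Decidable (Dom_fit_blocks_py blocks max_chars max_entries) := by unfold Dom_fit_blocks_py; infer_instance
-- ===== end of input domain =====

-- B trims the chosen list from the FRONT, maintaining a shrinking running total,
-- instead of A's accumulation from the end; objective: alternative decomposition, same cost.

-- ===== PORT A =====
-- chosen = blocks[-max_entries:] if max_entries else blocks  (shared guard of both versions)
def pvChosen (blocks : List String) (max_entries : Option Int) : List String :=
  match max_entries with
  | none => blocks
  | some n => if n ≠ 0 then PySem.List.slice blocks (some (-n)) none else blocks

-- the 'for block in reversed(chosen)' loop with break: state = (kept_rev, used)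
def pvAloop (max_chars : Int) : List String → List String → Int → List String
  | [], kept_rev, _ => kept_rev
  | b :: rest, kept_rev, used =>
    let add := PySem.Str.len b + (if kept_rev ≠ [] then 2 else 0)
    if used + add > max_chars ∧ kept_rev ≠ [] then kept_rev
    else pvAloop max_chars rest (kept_rev ++ [b]) (used + add)

def fit_blocks_py (blocks : List String) (max_chars : Int) (max_entries : Option Int) : String :=
  if blocks = [] ∨ max_chars ≤ 0 then ""
  else
    let chosen := pvChosen blocks max_entries
    PySem.Str.join "\n" (pvAloop max_chars chosen.reverse [] 0).reverse

-- ===== PORT B =====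
-- the 'while len(chosen) - i > 1 and total > max_chars' loop: state = (suffix chosen[i:], total)
def pvBloop (max_chars : Int) : List String → Int → List String
  | [], _ => []
  | b :: rest, total =>
    if rest ≠ [] ∧ total > max_chars then
      pvBloop max_chars rest (total - (PySem.Str.len b + 2))
    else b :: rest

def fit_blocks_py_alt (blocks : List String) (max_chars : Int) (max_entries : Option Int) : String :=
  if blocks = [] ∨ max_chars ≤ 0 then ""
  else
    let chosen := pvChosen blocks max_entries
    let total := (chosen.map PySem.Str.len).sum + 2 * ((chosen.length : Int) - 1)
    PySem.Str.join "\n" (pvBloop max_chars chosen total)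

-- ===== PRECONDITION & SPEC =====
def Spec_fit_blocks_py (blocks : List String) (max_chars : Int) (max_entries : Option Int) (out : String) : Prop := out = fit_blocks_py_alt blocks max_chars max_entries
instance (blocks : List String) (max_chars : Int) (max_entries : Option Int) (out : String) : Decidable (Spec_fit_blocks_py blocks max_chars max_entries out) := by unfold Spec_fit_blocks_py; infer_instance

-- ===== CLAIM (what is proved, stated in full; the proofs are below) =====
def Claim_equal_fit_blocks_py : Prop := ∀ (blocks : List String) (max_chars : Int) (max_entries : Option Int), Dom_fit_blocks_py blocks max_chars max_entries → Spec_fit_blocks_py blocks max_chars max_entries (fit_blocks_py blocks max_chars max_entries)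

-- ===== LEMMAS AND PROOFS =====

-- total weight of a list of blocks, counting each block as len + 2
def pvS (l : List String) : Int := (l.map PySem.Str.len).sum + 2 * (l.length : Int)

theorem pvSlen_nonneg (s : String) : 0 ≤ PySem.Str.len s := by
  simp [PySem.Str.len_eq]

theorem pvS_cons (b : String) (t : List String) :
    pvS (b :: t) = PySem.Str.len b + 2 + pvS t := by
  simp [pvS]; ring

theorem pvS_nonneg (l : List String) : 0 ≤ pvS l := by
  induction l with
  | nil => simp [pvS]
  | cons b t ih =>
    have := pvSlen_nonneg b
    rw [pvS_cons]; linarith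

theorem pvS_append (x y : List String) : pvS (x ++ y) = pvS x + pvS y := by
  simp [pvS]; ring

-- drop-through: if even (t :: k) is over budget, B's loop falls all the way to k
theorem pvB_drop (max_chars : Int) (q : List String) (t : String) (k : List String)
    (hk : k ≠ []) (hover : max_chars < pvS (t :: k) - 2) :
    pvBloop max_chars (q ++ t :: k) (pvS (q ++ t :: k) - 2) = pvBloop max_chars k (pvS k - 2) := by
  induction q with
  | nil =>
    simp only [List.nil_append, pvBloop]
    rw [if_pos ⟨hk, by have := pvS_cons t k; omega⟩]
    congr 1
    rw [pvS_cons]; ring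
  | cons a q' ih =>
    simp only [List.cons_append, pvBloop]
    have h1 : pvS (a :: (q' ++ t :: k)) = PySem.Str.len a + 2 + pvS (q' ++ t :: k) := pvS_cons a _
    have h2 : pvS (t :: k) ≤ pvS (q' ++ t :: k) := by
      have := pvS_nonneg q'
      rw [pvS_append]; omega
    have h3 := pvSlen_nonneg a
    rw [if_pos ⟨by simp, by omega⟩]
    have : pvS (a :: (q' ++ t :: k)) - 2 - (PySem.Str.len a + 2) = pvS (q' ++ t :: k) - 2 := by omega
    rw [this, ih]

-- terminal: a nonempty k that fits (or is a singleton) is returned unchanged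
theorem pvB_stop (max_chars : Int) (k : List String) (hk : k ≠ [])
    (h : pvS k - 2 ≤ max_chars ∨ k.length = 1) :
    pvBloop max_chars k (pvS k - 2) = k := by
  match k, hk with
  | b :: rest, _ =>
    cases rest with
    | nil => simp [pvBloop]
    | cons c r =>
      simp only [pvBloop]
      rw [if_neg]
      rintro ⟨-, hgt⟩
      rcases h with h | h
      · omega
      · simp at h

-- main invariant: A's loop from state (k, used) agrees with B's loop on p ++ k
theorem pvAB (max_chars : Int) (p k : List String) (used : Int) (hk : k ≠ [])
    (hfit : pvS k - 2 ≤ max_chars ∨ k.length = 1) (hused : used = pvS k - 2) :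
    (pvAloop max_chars p.reverse k.reverse used).reverse
      = pvBloop max_chars (p ++ k) (pvS (p ++ k) - 2) := by
  induction p using List.reverseRecOn generalizing k used with
  | nil =>
    simp only [List.reverse_nil, pvAloop, List.reverse_reverse, List.nil_append]
    exact (pvB_stop max_chars k hk hfit).symm
  | append_singleton p' b ih =>
    rw [List.reverse_append]
    simp only [List.reverse_singleton, List.singleton_append, pvAloop]
    have hkr : k.reverse ≠ [] := by simpa using hk
    have hadd : PySem.Str.len b + (if k.reverse ≠ [] then 2 else 0) = PySem.Str.len b + 2 := by
      rw [if_pos hkr]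
    rw [hadd]
    by_cases hbr : max_chars < used + (PySem.Str.len b + 2)
    · rw [if_pos ⟨by omega, hkr⟩, List.reverse_reverse]
      have hover : max_chars < pvS (b :: k) - 2 := by rw [pvS_cons]; omega
      rw [show p' ++ [b] ++ k = p' ++ b :: k by simp,
        pvB_drop max_chars p' b k hk hover, pvB_stop max_chars k hk hfit]
    · rw [if_neg (by rintro ⟨h, -⟩; omega)]
      have hrk : k.reverse ++ [b] = (b :: k).reverse := by simp
      have hused' : used + (PySem.Str.len b + 2) = pvS (b :: k) - 2 := by
        rw [pvS_cons]; omega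
      rw [hrk, hused',
        ih (b :: k) _ (by simp) (Or.inl (by omega)) rfl,
        show p' ++ [b] ++ k = p' ++ b :: k by simp]

-- ===== VERDICT (by name: the statement is the Claim_ definition above) =====
theorem fit_blocks_py_spec : Claim_equal_fit_blocks_py := by
  intro blocks max_chars max_entries _
  unfold Spec_fit_blocks_py fit_blocks_py fit_blocks_py_alt
  by_cases hg : blocks = [] ∨ max_chars ≤ 0
  · rw [if_pos hg, if_pos hg]
  · rw [if_neg hg, if_neg hg]
    show PySem.Str.join "\n" (pvAloop max_chars (pvChosen blocks max_entries).reverse [] 0).reverse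
      = PySem.Str.join "\n" (pvBloop max_chars (pvChosen blocks max_entries)
          (((pvChosen blocks max_entries).map PySem.Str.len).sum
            + 2 * (((pvChosen blocks max_entries).length : Int) - 1)))
    generalize pvChosen blocks max_entries = chosen
    have htot : (chosen.map PySem.Str.len).sum + 2 * ((chosen.length : Int) - 1)
        = pvS chosen - 2 := by
      simp [pvS]; ring
    rw [htot]
    congr 1
    induction chosen using List.reverseRecOn with
    | nil => simp [pvAloop, pvBloop]
    | append_singleton p b _ =>
      rw [List.reverse_append]
      simp only [List.reverse_singleton, List.singleton_append, pvAloop]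
      rw [if_neg (by rintro ⟨-, h⟩; exact h rfl), if_neg (by exact fun h => h rfl)]
      have : ([] : List String) ++ [b] = ([b] : List String).reverse := by simp
      rw [this, show (0 : Int) + (PySem.Str.len b + 0) = pvS [b] - 2 by simp [pvS]]
      exact pvAB max_chars p [b] _ (by simp) (Or.inr rfl) rfl
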